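-- pv_equiv track=rewrite | github.com/mikpim01/outspline | src/outspline/plugins/wxscheduler_basicrules/widgets.py | _compute_widget_values
-- ===== SOURCE A (Python) =====
-- def _compute_widget_values(diff):
--     adiff = abs(diff)
--
--     if adiff > 0:
--         for (number, unit) in ((604800, 'weeks'),
--                                (86400, 'days'),
--                                (3600, 'hours'),
--                                (60, 'minutes')):
--             if adiff % number == 0:
--                 return (adiff // number, unit)
--         else:
--             return (adiff // 60, 'minutes')
--     else:
--         return (0, 'minutes')
-- ===== SOURCE B (Python) =====
-- def _compute_widget_values(diff):
--     adiff = abs(diff)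
--     if adiff == 0:
--         return (0, 'minutes')
--     minutes = adiff // 60
--     if adiff % 60 != 0 or minutes % 60 != 0:
--         return (minutes, 'minutes')
--     hours = minutes // 60
--     if hours % 24 != 0:
--         return (hours, 'hours')
--     days = hours // 24
--     if days % 7 != 0:
--         return (days, 'days')
--     return (days // 7, 'weeks')
-- ===== Notes on version B (the rewrite author's own statement) =====
-- stated objective: alternative
-- what changed: Replaces A's scan over a table of absolute divisors (604800, 86400, 3600, 60) with a chain of running quotients refined level by level (minutes, then hours, days, weeks), exploiting that the units are nested multiples.
import Mathlib
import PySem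

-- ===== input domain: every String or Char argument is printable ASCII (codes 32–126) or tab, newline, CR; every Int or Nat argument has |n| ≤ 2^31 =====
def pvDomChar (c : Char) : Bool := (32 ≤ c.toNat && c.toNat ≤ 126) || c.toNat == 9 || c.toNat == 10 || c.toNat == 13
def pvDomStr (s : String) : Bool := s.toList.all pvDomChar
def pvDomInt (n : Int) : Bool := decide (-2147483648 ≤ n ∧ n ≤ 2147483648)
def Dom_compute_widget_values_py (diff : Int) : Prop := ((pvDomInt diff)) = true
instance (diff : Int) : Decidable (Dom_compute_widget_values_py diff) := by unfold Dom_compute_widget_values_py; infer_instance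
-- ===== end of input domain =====

-- B replaces A's scan over a table of absolute divisors by a chain of running quotients
-- refined level by level (minutes → hours → days → weeks); objective: alternative decomposition.

-- ===== PORT A =====
-- the for-loop over the (number, unit) table, with the for-else fallback
def pvALoop (adiff : Int) : List (Int × String) → Int × String
  | [] => (PySem.Int.floordiv adiff 60, "minutes")
  | (number, unit) :: rest =>
      if PySem.Int.mod adiff number = 0 then (PySem.Int.floordiv adiff number, unit)
      else pvALoop adiff rest

def compute_widget_values_py (diff : Int) : Int × String :=
  let adiff := |diff|
  if adiff > 0 then
    pvALoop adiff [(604800, "weeks"), (86400, "days"), (3600, "hours"), (60, "minutes")]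
  else (0, "minutes")

-- ===== PORT B =====
def compute_widget_values_py_alt (diff : Int) : Int × String :=
  let adiff := |diff|
  if adiff = 0 then (0, "minutes")
  else
    let minutes := PySem.Int.floordiv adiff 60
    if PySem.Int.mod adiff 60 ≠ 0 ∨ PySem.Int.mod minutes 60 ≠ 0 then (minutes, "minutes")
    else
      let hours := PySem.Int.floordiv minutes 60
      if PySem.Int.mod hours 24 ≠ 0 then (hours, "hours")
      else
        let days := PySem.Int.floordiv hours 24
        if PySem.Int.mod days 7 ≠ 0 then (days, "days")
        else (PySem.Int.floordiv days 7, "weeks")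

-- ===== PRECONDITION & SPEC =====
def Spec_compute_widget_values_py (diff : Int) (out : Int × String) : Prop := out = compute_widget_values_py_alt diff
instance (diff : Int) (out : Int × String) : Decidable (Spec_compute_widget_values_py diff out) := by unfold Spec_compute_widget_values_py; infer_instance

-- ===== CLAIM (what is proved, stated in full; the proofs are below) =====
def Claim_equal_compute_widget_values_py : Prop := ∀ (diff : Int), Dom_compute_widget_values_py diff → Spec_compute_widget_values_py diff (compute_widget_values_py diff)

-- ===== LEMMAS AND PROOFS =====

-- ===== VERDICT (by name: the statement is the Claim_ definition above) =====
theorem compute_widget_values_py_spec : Claim_equal_compute_widget_values_py := by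
  intro diff _
  unfold Spec_compute_widget_values_py compute_widget_values_py compute_widget_values_py_alt
  simp only [pvALoop]
  simp only [PySem.Int.mod_eq_emod_of_pos (by omega : (0:Int) < 604800),
    PySem.Int.mod_eq_emod_of_pos (by omega : (0:Int) < 86400),
    PySem.Int.mod_eq_emod_of_pos (by omega : (0:Int) < 3600),
    PySem.Int.mod_eq_emod_of_pos (by omega : (0:Int) < 60),
    PySem.Int.mod_eq_emod_of_pos (by omega : (0:Int) < 24),
    PySem.Int.mod_eq_emod_of_pos (by omega : (0:Int) < 7),
    PySem.Int.floordiv_eq_ediv_of_pos (by omega : (0:Int) < 604800),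
    PySem.Int.floordiv_eq_ediv_of_pos (by omega : (0:Int) < 86400),
    PySem.Int.floordiv_eq_ediv_of_pos (by omega : (0:Int) < 3600),
    PySem.Int.floordiv_eq_ediv_of_pos (by omega : (0:Int) < 60),
    PySem.Int.floordiv_eq_ediv_of_pos (by omega : (0:Int) < 24),
    PySem.Int.floordiv_eq_ediv_of_pos (by omega : (0:Int) < 7)]
  have habs : (0:Int) ≤ |diff| := abs_nonneg diff
  split_ifs <;> first | rfl | (exfalso; omega) | (refine Prod.ext ?_ rfl; omega)
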